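-- pv_equiv track=rewrite | github.com/abdelaziz2642004/alignerrr-tasks-zev | B/src/zev/command_validator.py | _extract_unquoted_words
-- ===== SOURCE A (Python) =====
-- def _extract_unquoted_words(command: str) -> list[str]:
--     """Extract words from command that are not inside quotes."""
--     words = []
--     current_word = []
--     in_single_quote = False
--     in_double_quote = False
--     escaped = False
--
--     for char in command:
--         if escaped:
--             escaped = False
--             if not in_single_quote and not in_double_quote:
--                 current_word.append(char)
--             continue
--
--         if char == "\\" and not in_single_quote:
--             escaped = True
--             continue
--
--         if char == "'" and not in_double_quote:
--             in_single_quote = not in_single_quote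
--             continue
--
--         if char == '"' and not in_single_quote:
--             in_double_quote = not in_double_quote
--             continue
--
--         if in_single_quote or in_double_quote:
--             continue
--
--         if char.isspace() or char in ";|&<>(){}":
--             if current_word:
--                 words.append("".join(current_word))
--                 current_word = []
--         else:
--             current_word.append(char)
--
--     if current_word:
--         words.append("".join(current_word))
--
--     return words
-- ===== SOURCE B (Python) =====
-- def _extract_unquoted_words(command: str) -> list[str]:
--     """Index-based scanner: inner loops skip quoted regions, escapes consume two chars at once."""
--     words = []
--     word = []
--     n = len(command)
--     i = 0
--     while i < n:
--         c = command[i]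
--         if c.isspace() or c in ";|&<>(){}":
--             if word:
--                 words.append("".join(word))
--                 word = []
--             i += 1
--         elif c == "\\":
--             if i + 1 < n:
--                 word.append(command[i + 1])
--             i += 2
--         elif c == "'":
--             i += 1
--             while i < n and command[i] != "'":
--                 i += 1
--             i += 1
--         elif c == '"':
--             i += 1
--             while i < n:
--                 if command[i] == "\\":
--                     i += 2
--                 elif command[i] == '"':
--                     i += 1
--                     break
--                 else:
--                     i += 1
--         else:
--             word.append(c)
--             i += 1
--     if word:
--         words.append("".join(word))
--     return words
-- ===== Notes on version B (the rewrite author's own statement) =====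
-- stated objective: alternative
-- what changed: A threads five pieces of loop state (in_single_quote, in_double_quote, escaped) through one flag-driven pass; B is an index-based scanner in which each quoted region is consumed by its own dedicated inner loop and an escape consumes two characters at once, so no quote/escape flags exist.
import Mathlib
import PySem

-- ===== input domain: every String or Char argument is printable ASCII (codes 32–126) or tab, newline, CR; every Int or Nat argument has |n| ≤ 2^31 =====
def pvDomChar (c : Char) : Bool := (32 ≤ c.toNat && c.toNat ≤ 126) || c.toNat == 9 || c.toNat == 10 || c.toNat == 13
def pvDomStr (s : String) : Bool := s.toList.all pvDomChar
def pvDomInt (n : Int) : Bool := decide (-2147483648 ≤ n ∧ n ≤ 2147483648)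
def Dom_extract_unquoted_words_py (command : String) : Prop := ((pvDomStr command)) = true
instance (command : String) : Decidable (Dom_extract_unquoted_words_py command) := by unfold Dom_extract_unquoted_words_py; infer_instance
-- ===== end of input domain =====

-- B rewrites A's five-flag single-pass scanner as an index-free structural scanner whose quoted
-- regions and escapes are consumed by dedicated inner loops (objective: simpler control flow).

-- shared: the delimiter string ";|&<>(){}" and the flush of a pending word ("".join)
def pvDelims : List Char := ";|&<>(){}".toList

def pvFlush (words : List String) (cur : List Char) : List String :=
  if cur ≠ [] then words ++ [String.ofList cur] else words

-- ===== PORT A =====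
-- state: (words, current_word, in_single_quote, in_double_quote, escaped)
def pvStepA (st : List String × List Char × Bool × Bool × Bool) (c : Char) :
    List String × List Char × Bool × Bool × Bool :=
  match st with
  | (words, cur, sq, dq, esc) =>
    if esc then
      (if !sq && !dq then (words, cur ++ [c], sq, dq, false) else (words, cur, sq, dq, false))
    else if c = '\\' && !sq then (words, cur, sq, dq, true)
    else if c = '\'' && !dq then (words, cur, !sq, dq, esc)
    else if c = '"' && !sq then (words, cur, sq, !dq, esc)
    else if sq || dq then (words, cur, sq, dq, esc)
    else if PySem.Chars.isspace c || pvDelims.contains c then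
      (if cur ≠ [] then (words ++ [String.ofList cur], [], sq, dq, esc) else (words, cur, sq, dq, esc))
    else (words, cur ++ [c], sq, dq, esc)

def extract_unquoted_words_py (command : String) : List String :=
  let st := command.toList.foldl pvStepA ([], [], false, false, false)
  pvFlush st.1 st.2.1

-- ===== PORT B =====
mutual
def pvScanB : List Char → List Char → List String → List String
  | [], cur, words => pvFlush words cur
  | c :: rest, cur, words =>
    if PySem.Chars.isspace c || pvDelims.contains c then
      pvScanB rest [] (pvFlush words cur)
    else if c = '\\' then
      match rest with
      | [] => pvFlush words cur
      | d :: rest' => pvScanB rest' (cur ++ [d]) words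
    else if c = '\'' then pvSkipSingle rest cur words
    else if c = '"' then pvSkipDouble rest cur words
    else pvScanB rest (cur ++ [c]) words

def pvSkipSingle : List Char → List Char → List String → List String
  | [], cur, words => pvFlush words cur
  | c :: rest, cur, words =>
    if c = '\'' then pvScanB rest cur words else pvSkipSingle rest cur words

def pvSkipDouble : List Char → List Char → List String → List String
  | [], cur, words => pvFlush words cur
  | c :: rest, cur, words =>
    if c = '\\' then
      match rest with
      | [] => pvFlush words cur
      | _ :: rest' => pvSkipDouble rest' cur words
    else if c = '"' then pvScanB rest cur words
    else pvSkipDouble rest cur words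
end

def extract_unquoted_words_py_alt (command : String) : List String :=
  pvScanB command.toList [] []

-- ===== PRECONDITION & SPEC =====
def Spec_extract_unquoted_words_py (command : String) (out : List String) : Prop := out = extract_unquoted_words_py_alt command
instance (command : String) (out : List String) : Decidable (Spec_extract_unquoted_words_py command out) := by unfold Spec_extract_unquoted_words_py; infer_instance

-- ===== CLAIM (what is proved, stated in full; the proofs are below) =====
def Claim_equal_extract_unquoted_words_py : Prop := ∀ (command : String), Dom_extract_unquoted_words_py command → Spec_extract_unquoted_words_py command (extract_unquoted_words_py command)

-- ===== LEMMAS AND PROOFS =====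

-- run A's fold from an arbitrary state and finish with the final flush
def pvRunA (l : List Char) (words : List String) (cur : List Char) (sq dq esc : Bool) :
    List String :=
  let st := l.foldl pvStepA (words, cur, sq, dq, esc)
  pvFlush st.1 st.2.1

lemma pvRunA_eq (command : String) :
    extract_unquoted_words_py command = pvRunA command.toList [] [] false false false := rfl

-- one-step evaluation lemmas for B's scanner (used by rw below)
lemma scanB_nil (cur : List Char) (words : List String) :
    pvScanB [] cur words = pvFlush words cur := by
  unfold pvScanB
  rfl

lemma scanB_bs (rest : List Char) (cur : List Char) (words : List String) :
    pvScanB ('\\' :: rest) cur words =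
      (match rest with
       | [] => pvFlush words cur
       | d :: r => pvScanB r (cur ++ [d]) words) := by
  have hns : ¬ (PySem.Chars.isspace '\\' = true ∨ '\\' ∈ pvDelims) := by decide
  conv_lhs => unfold pvScanB
  simp [hns]

lemma scanB_sq (rest : List Char) (cur : List Char) (words : List String) :
    pvScanB ('\'' :: rest) cur words = pvSkipSingle rest cur words := by
  have hns : ¬ (PySem.Chars.isspace '\'' = true ∨ '\'' ∈ pvDelims) := by decide
  conv_lhs => unfold pvScanB
  simp [hns]

lemma scanB_dq (rest : List Char) (cur : List Char) (words : List String) :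
    pvScanB ('"' :: rest) cur words = pvSkipDouble rest cur words := by
  have hns : ¬ (PySem.Chars.isspace '"' = true ∨ '"' ∈ pvDelims) := by decide
  conv_lhs => unfold pvScanB
  simp [hns]

lemma scanB_delim {c : Char} (hd : PySem.Chars.isspace c = true ∨ c ∈ pvDelims)
    (rest : List Char) (cur : List Char) (words : List String) :
    pvScanB (c :: rest) cur words = pvScanB rest [] (pvFlush words cur) := by
  conv_lhs => unfold pvScanB
  simp [hd]

lemma scanB_other {c : Char} (hd : ¬ (PySem.Chars.isspace c = true ∨ c ∈ pvDelims))
    (h1 : c ≠ '\\') (h2 : c ≠ '\'') (h3 : c ≠ '"')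
    (rest : List Char) (cur : List Char) (words : List String) :
    pvScanB (c :: rest) cur words = pvScanB rest (cur ++ [c]) words := by
  conv_lhs => unfold pvScanB
  simp [hd, h1, h2, h3]

lemma skipSingle_nil (cur : List Char) (words : List String) :
    pvSkipSingle [] cur words = pvFlush words cur := by
  unfold pvSkipSingle
  rfl

lemma skipSingle_close (rest : List Char) (cur : List Char) (words : List String) :
    pvSkipSingle ('\'' :: rest) cur words = pvScanB rest cur words := by
  conv_lhs => unfold pvSkipSingle
  simp

lemma skipSingle_skip {c : Char} (h2 : c ≠ '\'') (rest : List Char) (cur : List Char)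
    (words : List String) :
    pvSkipSingle (c :: rest) cur words = pvSkipSingle rest cur words := by
  conv_lhs => unfold pvSkipSingle
  simp [h2]

lemma skipDouble_nil (cur : List Char) (words : List String) :
    pvSkipDouble [] cur words = pvFlush words cur := by
  unfold pvSkipDouble
  rfl

lemma skipDouble_bs (rest : List Char) (cur : List Char) (words : List String) :
    pvSkipDouble ('\\' :: rest) cur words =
      (match rest with
       | [] => pvFlush words cur
       | _ :: r => pvSkipDouble r cur words) := by
  conv_lhs => unfold pvSkipDouble
  simp

lemma skipDouble_close (rest : List Char) (cur : List Char) (words : List String) :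
    pvSkipDouble ('"' :: rest) cur words = pvScanB rest cur words := by
  conv_lhs => unfold pvSkipDouble
  simp

lemma skipDouble_skip {c : Char} (h1 : c ≠ '\\') (h3 : c ≠ '"') (rest : List Char)
    (cur : List Char) (words : List String) :
    pvSkipDouble (c :: rest) cur words = pvSkipDouble rest cur words := by
  conv_lhs => unfold pvSkipDouble
  simp [h1, h3]

-- the heart: A's fold, started in each of the five reachable flag states, equals the
-- corresponding B loop (mutual induction packaged as one conjunction, induction on the list)
lemma pvKey : ∀ (l : List Char) (cur : List Char) (words : List String),
    (pvRunA l words cur false false false = pvScanB l cur words) ∧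
    (pvRunA l words cur true false false = pvSkipSingle l cur words) ∧
    (pvRunA l words cur false true false = pvSkipDouble l cur words) ∧
    (pvRunA l words cur false false true =
      (match l with
       | [] => pvFlush words cur
       | d :: r => pvScanB r (cur ++ [d]) words)) ∧
    (pvRunA l words cur false true true =
      (match l with
       | [] => pvFlush words cur
       | _ :: r => pvSkipDouble r cur words)) := by
  intro l
  induction l with
  | nil =>
    intro cur words
    simp [pvRunA, scanB_nil, skipSingle_nil, skipDouble_nil]
  | cons c rest ih =>
    intro cur words
    refine ⟨?_, ?_, ?_, ?_, ?_⟩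
    · -- plain state
      by_cases h1 : c = '\\'
      · subst h1
        have h : pvRunA ('\\' :: rest) words cur false false false =
            pvRunA rest words cur false false true := by
          simp [pvRunA, List.foldl, pvStepA]
        rw [h, (ih cur words).2.2.2.1, scanB_bs]
      · by_cases h2 : c = '\''
        · subst h2
          have h : pvRunA ('\'' :: rest) words cur false false false =
              pvRunA rest words cur true false false := by
            simp [pvRunA, List.foldl, pvStepA]
          rw [h, (ih cur words).2.1, scanB_sq]
        · by_cases h3 : c = '"'
          · subst h3
            have h : pvRunA ('"' :: rest) words cur false false false =
                pvRunA rest words cur false true false := by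
              simp [pvRunA, List.foldl, pvStepA]
            rw [h, (ih cur words).2.2.1, scanB_dq]
          · by_cases hd : PySem.Chars.isspace c = true ∨ c ∈ pvDelims
            · have h : pvRunA (c :: rest) words cur false false false =
                  pvRunA rest (pvFlush words cur) [] false false false := by
                by_cases hc : cur = []
                · subst hc
                  simp [pvRunA, List.foldl, pvStepA, pvFlush, h1, h2, h3, hd]
                · simp [pvRunA, List.foldl, pvStepA, pvFlush, h1, h2, h3, hd, hc]
              rw [h, (ih [] (pvFlush words cur)).1, scanB_delim hd]
            · have h : pvRunA (c :: rest) words cur false false false =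
                  pvRunA rest words (cur ++ [c]) false false false := by
                simp [pvRunA, List.foldl, pvStepA, h1, h2, h3, hd]
              rw [h, (ih (cur ++ [c]) words).1, scanB_other hd h1 h2 h3]
    · -- inside single quote
      by_cases h2 : c = '\''
      · subst h2
        have h : pvRunA ('\'' :: rest) words cur true false false =
            pvRunA rest words cur false false false := by
          simp [pvRunA, List.foldl, pvStepA]
        rw [h, (ih cur words).1, skipSingle_close]
      · have h : pvRunA (c :: rest) words cur true false false =
            pvRunA rest words cur true false false := by
          simp [pvRunA, List.foldl, pvStepA, h2]
        rw [h, (ih cur words).2.1, skipSingle_skip h2]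
    · -- inside double quote
      by_cases h1 : c = '\\'
      · subst h1
        have h : pvRunA ('\\' :: rest) words cur false true false =
            pvRunA rest words cur false true true := by
          simp [pvRunA, List.foldl, pvStepA]
        rw [h, (ih cur words).2.2.2.2, skipDouble_bs]
      · by_cases h3 : c = '"'
        · subst h3
          have h : pvRunA ('"' :: rest) words cur false true false =
              pvRunA rest words cur false false false := by
            simp [pvRunA, List.foldl, pvStepA]
          rw [h, (ih cur words).1, skipDouble_close]
        · have h : pvRunA (c :: rest) words cur false true false =
              pvRunA rest words cur false true false := by
            simp [pvRunA, List.foldl, pvStepA, h1, h3]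
          rw [h, (ih cur words).2.2.1, skipDouble_skip h1 h3]
    · -- escaped, outside quotes: the next char is appended
      have h : pvRunA (c :: rest) words cur false false true =
          pvRunA rest words (cur ++ [c]) false false false := by
        simp [pvRunA, List.foldl, pvStepA]
      rw [h, (ih (cur ++ [c]) words).1]
    · -- escaped, inside double quote: the next char is discarded
      have h : pvRunA (c :: rest) words cur false true true =
          pvRunA rest words cur false true false := by
        simp [pvRunA, List.foldl, pvStepA]
      rw [h, (ih cur words).2.2.1]

-- ===== VERDICT (by name: the statement is the Claim_ definition above) =====
theorem extract_unquoted_words_py_spec : Claim_equal_extract_unquoted_words_py := by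
  intro command _
  unfold Spec_extract_unquoted_words_py
  rw [pvRunA_eq, (pvKey command.toList [] []).1]
  rfl
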